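-- pv_equiv track=rewrite | github.com/joooooonson/LOGICnPROG_2017_Fall | 2dchallenge/joonson_w0410150_702_boxOrDiamond.py | drawing_diamond
-- ===== SOURCE A (Python) =====
-- def drawing_diamond(size, character):
--     side = size + size -1
--     drawing = []
--     for i in range(size):
--         line = [" "]*side
--         for j in range(side):
--             cen = size - 1
--             if j >= cen-i and j <=cen+i:
--                 line[j]=character
--         drawing.append(line)
--     for i in range(side - size):
--         line = [" "] * side
--         for j in range(side):
--             if j>=i+1 and j<side-1-i:
--                 line[j]=character
--         drawing.append(line)
--     return drawing
-- ===== SOURCE B (Python) =====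
-- def drawing_diamond(size, character):
--     side = 2 * size - 1
--     drawing = []
--     for r in range(side):
--         d = abs(r - (size - 1))
--         drawing.append([" "] * d + [character] * (side - 2 * d) + [" "] * d)
--     return drawing
-- ===== Notes on version B (the rewrite author's own statement) =====
-- stated objective: simpler
-- what changed: Replaces A's two passes (top half built by index-by-index mutation under a growing condition, bottom half under a shrinking one) with a single loop over all rows that constructs each row directly from its center distance d as three concatenated blocks ' '*d + character*(side-2d) + ' '*d, with no row mutation and no inner index loop.
import Mathlib
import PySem

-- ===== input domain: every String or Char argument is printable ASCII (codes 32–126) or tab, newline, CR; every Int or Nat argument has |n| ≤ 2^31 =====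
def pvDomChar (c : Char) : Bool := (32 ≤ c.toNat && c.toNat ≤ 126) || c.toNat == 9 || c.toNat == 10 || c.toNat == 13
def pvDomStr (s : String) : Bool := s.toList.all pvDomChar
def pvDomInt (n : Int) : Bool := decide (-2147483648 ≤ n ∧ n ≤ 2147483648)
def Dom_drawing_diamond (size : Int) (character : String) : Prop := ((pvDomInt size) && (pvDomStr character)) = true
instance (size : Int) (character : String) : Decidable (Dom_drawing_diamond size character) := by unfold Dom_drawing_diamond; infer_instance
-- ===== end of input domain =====

-- B replaces A's two loops (growing top half, shrinking bottom half) by one loop over all rows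
-- that builds each row directly from its center distance d as three replicate blocks (simpler).

-- ===== PORT A =====
-- literal transliteration of A: two passes, each building a row by mutating a
-- blank row at every index j that satisfies the pass's condition
def drawing_diamond (size : Int) (character : String) : List (List String) :=
  let side := size + size - 1
  let drawing : List (List String) :=
    (PySem.List.pyRange 0 size 1).foldl (fun drawing i =>
      let line := (PySem.List.pyRange 0 side 1).foldl (fun line j =>
        let cen := size - 1
        if cen - i ≤ j ∧ j ≤ cen + i then line.set j.toNat character else line)
        (List.replicate side.toNat " ")
      drawing ++ [line]) []
  (PySem.List.pyRange 0 (side - size) 1).foldl (fun drawing i =>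
    let line := (PySem.List.pyRange 0 side 1).foldl (fun line j =>
      if i + 1 ≤ j ∧ j < side - 1 - i then line.set j.toNat character else line)
      (List.replicate side.toNat " ")
    drawing ++ [line]) drawing

-- ===== PORT B =====
-- literal transliteration of B: one loop over all rows, row built from center distance d
def drawing_diamond_alt (size : Int) (character : String) : List (List String) :=
  let side := 2 * size - 1
  (PySem.List.pyRange 0 side 1).foldl (fun drawing r =>
    let d := |r - (size - 1)|
    drawing ++ [List.replicate d.toNat " " ++ List.replicate (side - 2 * d).toNat character
                ++ List.replicate d.toNat " "]) []

-- ===== PRECONDITION & SPEC =====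
def Spec_drawing_diamond (size : Int) (character : String) (out : List (List String)) : Prop := out = drawing_diamond_alt size character
instance (size : Int) (character : String) (out : List (List String)) : Decidable (Spec_drawing_diamond size character out) := by unfold Spec_drawing_diamond; infer_instance

-- ===== CLAIM (what is proved, stated in full; the proofs are below) =====
def Claim_equal_drawing_diamond : Prop := ∀ (size : Int) (character : String), Dom_drawing_diamond size character → Spec_drawing_diamond size character (drawing_diamond size character)

-- ===== LEMMAS AND PROOFS =====

-- setting every index k < n satisfying P in a blank row of length m
lemma foldl_set_replicate (c : String) (P : Nat → Prop) [DecidablePred P] :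
    ∀ (n m : Nat), n ≤ m →
      (List.range n).foldl (fun line k => if P k then line.set k c else line) (List.replicate m " ")
        = (List.range n).map (fun k => if P k then c else " ") ++ List.replicate (m - n) " " := by
  intro n
  induction n with
  | zero => intro m _; simp
  | succ n ih =>
    intro m h
    rw [List.range_succ, List.foldl_append, List.map_append, ih m (by omega)]
    have hrep : List.replicate (m - n) " " = " " :: List.replicate (m - (n+1)) " " := by
      have : m - n = (m - (n+1)) + 1 := by omega
      rw [this, List.replicate_succ]
    simp only [List.foldl_cons, List.foldl_nil, List.map_cons, List.map_nil, hrep]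
    by_cases hp : P n
    · simp only [hp, if_true]
      rw [List.set_append_right _ _ (by simp)]
      simp
    · simp [hp]


lemma map_ite_range (m d : Nat) (c : String) (h : 2 * d ≤ m) :
    (List.range m).map (fun k => if d ≤ k ∧ k < m - d then c else " ")
      = List.replicate d " " ++ List.replicate (m - 2 * d) c ++ List.replicate d " " := by
  have hm : m = d + ((m - 2*d) + d) := by omega
  rw [hm, List.range_add, List.range_add, List.map_append, List.map_append, List.append_assoc]
  congr 1
  · rw [List.eq_replicate_iff]
    refine ⟨by simp, ?_⟩
    intro b hb
    simp only [List.mem_map, List.mem_range] at hb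
    obtain ⟨k, hk, rfl⟩ := hb
    simp only [ite_eq_right_iff]
    omega
  rw [List.map_append]
  congr 1
  · rw [List.eq_replicate_iff]
    refine ⟨by simp; omega, ?_⟩
    intro b hb
    simp only [List.mem_map, List.mem_range] at hb
    obtain ⟨k, hk, ⟨k2, hk2, rfl⟩⟩ := hb
    simp only [ite_eq_left_iff]
    omega
  · rw [List.eq_replicate_iff]
    refine ⟨by simp, ?_⟩
    intro b hb
    simp only [List.map_map, List.mem_map, List.mem_range, Function.comp] at hb
    obtain ⟨k, hk, rfl⟩ := hb
    simp only [ite_eq_right_iff]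
    omega

lemma row_core (m : Nat) (c : String) (P : Int → Prop) [DecidablePred P] (d : Nat)
    (hd : 2 * d ≤ m)
    (hP : ∀ j : Int, 0 ≤ j → j < (m : Int) → (P j ↔ ((d : Int) ≤ j ∧ j < (m : Int) - d))) :
    (PySem.List.pyRange 0 (m : Int) 1).foldl
        (fun line j => if P j then line.set j.toNat c else line)
        (List.replicate m " ")
      = List.replicate d " " ++ List.replicate (m - 2 * d) c ++ List.replicate d " " := by
  rw [PySem.List.pyRange_one, List.foldl_map]
  simp only [sub_zero, Int.toNat_natCast, zero_add]
  rw [foldl_set_replicate c (fun k => P (k : Int)) m m le_rfl]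
  simp only [Nat.sub_self, List.replicate_zero, List.append_nil]
  rw [List.map_congr_left (g := fun k => if d ≤ k ∧ k < m - d then c else " ")
      (fun k hk => by
        simp only [List.mem_range] at hk
        have h1 := hP (k : Int) (by positivity) (by exact_mod_cast hk)
        by_cases hp : P (k : Int)
        · have h2 := h1.mp hp
          simp only [hp, if_true]
          exact (if_pos (show d ≤ k ∧ k < m - d by omega)).symm
        · simp only [hp, if_false]
          exact (if_neg (show ¬(d ≤ k ∧ k < m - d) by
            intro hc; exact hp (h1.mpr (by omega)))).symm)]
  exact map_ite_range m d c hd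

lemma main_eq (size : Int) (character : String) :
    drawing_diamond size character = drawing_diamond_alt size character := by
  simp only [drawing_diamond, drawing_diamond_alt]
  rcases (by omega : size ≤ 0 ∨ 0 < size) with hle | hpos
  · rw [PySem.List.pyRange_one_eq_nil (by omega : size ≤ 0),
        PySem.List.pyRange_one_eq_nil (by omega : size + size - 1 - size ≤ 0),
        PySem.List.pyRange_one_eq_nil (by omega : 2 * size - 1 ≤ 0)]
    simp
  · lift size to ℕ using hpos.le with n
    have hn : 1 ≤ n := by exact_mod_cast hpos
    rw [PySem.List.foldl_append_singleton_eq_map, PySem.List.foldl_append_singleton_eq_map,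
        PySem.List.foldl_append_singleton_eq_map]
    rw [PySem.List.pyRange_one_append 0 (n : Int) (2 * n - 1) (by omega) (by omega), List.map_append]
    simp only [List.nil_append]
    congr 1
    · apply List.map_congr_left
      intro i hi
      rw [PySem.List.mem_pyRange_one] at hi
      have hm : ((n:Int) + n - 1) = ((2*n-1 : Nat) : Int) := by omega
      rw [hm, Int.toNat_natCast]
      rw [row_core (2*n-1) character _ ((n-1) - i.toNat) (by omega)
          (fun j h0 hj => by constructor <;> (intro hc; constructor <;> omega))]
      rw [abs_of_nonpos (by omega : i - ((n:Int) - 1) ≤ 0)]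
      have hm2 : (2 * (n:Int) - 1) = ((2*n-1 : Nat) : Int) := by omega
      rw [hm2]
      congr 3 <;> omega
    · have h2 : ((n:Int) + n - 1 - n) = (n:Int) - 1 := by ring
      rw [h2, PySem.List.pyRange_one 0 ((n:Int) - 1), PySem.List.pyRange_one (n:Int) (2 * (n:Int) - 1),
          List.map_map, List.map_map]
      have h3 : ((n:Int) - 1 - 0).toNat = n - 1 := by omega
      have h4 : (2 * (n:Int) - 1 - n).toNat = n - 1 := by omega
      rw [h3, h4]
      apply List.map_congr_left
      intro k hk
      rw [List.mem_range] at hk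
      simp only [Function.comp, zero_add]
      have hm : ((n:Int) + n - 1) = ((2*n-1 : Nat) : Int) := by omega
      rw [hm, Int.toNat_natCast]
      rw [row_core (2*n-1) character _ (k+1) (by omega)
          (fun j h0 hj => by constructor <;> (intro hc; constructor <;> omega))]
      rw [abs_of_nonneg (by omega : (0:Int) ≤ (n:Int) + k - ((n:Int) - 1))]
      have hm2 : (2 * (n:Int) - 1) = ((2*n-1 : Nat) : Int) := by omega
      rw [hm2]
      congr 3 <;> omega

-- ===== VERDICT (by name: the statement is the Claim_ definition above) =====
theorem drawing_diamond_spec : Claim_equal_drawing_diamond := by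
  intro size character _
  exact main_eq size character
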